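-- pv_equiv track=rewrite | github.com/ragheeda-boop/ai-sales-os | scripts/enrichment/muhide_strategic_analysis.py | score_geography
-- ===== SOURCE A (Python) =====
-- PRIORITY_COUNTRIES = {
--     "saudi arabia", "united arab emirates", "uae", "qatar", "bahrain",
--     "oman", "kuwait", "jordan", "egypt", "lebanon", "iraq",
--     "morocco", "tunisia", "algeria", "libya",
--     "turkey", "pakistan", "india",
-- }
--
-- def score_geography(country: str) -> int:
--     """Score based on geographic priority. (0-10)"""
--     if not country:
--         return 4  # Unknown
--     c = country.lower().strip()
--     for pc in PRIORITY_COUNTRIES: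
--         if pc in c or c in pc:
--             return 10
--     # Other regions with B2B trade potential
--     moderate_countries = {"united states", "united kingdom", "germany", "france",
--                           "china", "japan", "south korea", "singapore", "malaysia",
--                           "indonesia", "thailand", "brazil", "mexico", "south africa",
--                           "nigeria", "kenya", "australia", "canada", "netherlands",
--                           "switzerland", "italy", "spain"}
--     for mc in moderate_countries:
--         if mc in c or c in mc:
--             return 6
--     return 4
-- ===== SOURCE B (Python) =====
-- PRIORITY_COUNTRIES = {
--     "saudi arabia", "united arab emirates", "uae", "qatar", "bahrain",
--     "oman", "kuwait", "jordan", "egypt", "lebanon", "iraq",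
--     "morocco", "tunisia", "algeria", "libya",
--     "turkey", "pakistan", "india",
-- }
--
-- _MODERATE_COUNTRIES = {"united states", "united kingdom", "germany", "france",
--                        "china", "japan", "south korea", "singapore", "malaysia",
--                        "indonesia", "thailand", "brazil", "mexico", "south africa",
--                        "nigeria", "kenya", "australia", "canada", "netherlands",
--                        "switzerland", "italy", "spain"}
--
-- # one combined tier table: priority -> 10, moderate -> 6
-- _TIER_TABLE = [(s, 10) for s in PRIORITY_COUNTRIES] + [(s, 6) for s in _MODERATE_COUNTRIES]
--
-- def score_geography(country: str) -> int:
--     """Score based on geographic priority. (0-10)"""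
--     if not country:
--         return 4
--     c = country.lower().strip()
--     best = 4
--     for name, tier in _TIER_TABLE:
--         if name in c or c in name:
--             best = max(best, tier)
--     return best
-- ===== Notes on version B (the rewrite author's own statement) =====
-- stated objective: simpler
-- what changed: The two early-return loops over two separate sets are replaced by a single max-accumulating pass over one combined (substring, tier) table; correctness rests on the tiers being nested (10 > 6 > 4).
import Mathlib
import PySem

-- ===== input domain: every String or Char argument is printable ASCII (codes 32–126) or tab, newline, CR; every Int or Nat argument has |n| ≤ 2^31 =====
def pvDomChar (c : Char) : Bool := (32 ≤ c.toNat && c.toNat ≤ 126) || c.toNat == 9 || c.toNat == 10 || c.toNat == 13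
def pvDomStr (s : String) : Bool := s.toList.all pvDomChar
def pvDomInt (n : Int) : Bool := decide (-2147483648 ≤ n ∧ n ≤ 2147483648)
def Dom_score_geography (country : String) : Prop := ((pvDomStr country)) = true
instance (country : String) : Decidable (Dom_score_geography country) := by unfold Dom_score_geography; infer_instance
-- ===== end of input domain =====

-- B replaces A's two early-return loops by one max-accumulating pass over a combined tier table (objective: simpler).

-- ===== PORT A =====
-- module-level constants shared by both Python versions
def pvPriority : List String :=
  ["saudi arabia", "united arab emirates", "uae", "qatar", "bahrain",
   "oman", "kuwait", "jordan", "egypt", "lebanon", "iraq",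
   "morocco", "tunisia", "algeria", "libya",
   "turkey", "pakistan", "india"]

def pvModerate : List String :=
  ["united states", "united kingdom", "germany", "france",
   "china", "japan", "south korea", "singapore", "malaysia",
   "indonesia", "thailand", "brazil", "mexico", "south africa",
   "nigeria", "kenya", "australia", "canada", "netherlands",
   "switzerland", "italy", "spain"]

-- Python's `x in c or c in x` (both ports write this same test)
def pvMatch (x c : String) : Bool := PySem.Str.isIn x c || PySem.Str.isIn c x

-- A's second loop: `for mc in moderate_countries: if …: return 6` then `return 4`
def pvLoopM (c : String) : List String → Int
  | [] => 4
  | m :: ms => if pvMatch m c then 6 else pvLoopM c ms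

-- A's first loop: `for pc in PRIORITY_COUNTRIES: if …: return 10`, falling through to the second loop
def pvLoopP (c : String) : List String → Int
  | [] => pvLoopM c pvModerate
  | p :: ps => if pvMatch p c then 10 else pvLoopP c ps

def score_geography (country : String) : Int :=
  if country = "" then 4
  else pvLoopP (PySem.Str.strip (PySem.Str.lower country)) pvPriority

-- ===== PORT B =====
-- _TIER_TABLE = [(s, 10) for s in PRIORITY_COUNTRIES] + [(s, 6) for s in _MODERATE_COUNTRIES]
def pvTierTable : List (String × Int) :=
  pvPriority.map (fun s => (s, 10)) ++ pvModerate.map (fun s => (s, 6))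

def score_geography_alt (country : String) : Int :=
  if country = "" then 4
  else
    let c := PySem.Str.strip (PySem.Str.lower country)
    pvTierTable.foldl (fun best nt => if pvMatch nt.1 c then max best nt.2 else best) 4

-- ===== PRECONDITION & SPEC =====
def Spec_score_geography (country : String) (out : Int) : Prop := out = score_geography_alt country
instance (country : String) (out : Int) : Decidable (Spec_score_geography country out) := by unfold Spec_score_geography; infer_instance

-- ===== CLAIM (what is proved, stated in full; the proofs are below) =====
def Claim_equal_score_geography : Prop := ∀ (country : String), Dom_score_geography country → Spec_score_geography country (score_geography country)

-- ===== LEMMAS AND PROOFS =====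

theorem pvLoopM_eq (c : String) (L : List String) :
    pvLoopM c L = if L.any (fun m => pvMatch m c) then 6 else 4 := by
  induction L with
  | nil => simp [pvLoopM]
  | cons m ms ih =>
    simp only [pvLoopM, List.any_cons]
    by_cases h : pvMatch m c <;> simp [h, ih]

theorem pvLoopP_eq (c : String) (L : List String) :
    pvLoopP c L = if L.any (fun p => pvMatch p c) then 10 else pvLoopM c pvModerate := by
  induction L with
  | nil => simp [pvLoopP]
  | cons p ps ih =>
    simp only [pvLoopP, List.any_cons]
    by_cases h : pvMatch p c <;> simp [h, ih]

theorem pvFold_const (c : String) (t : Int) (L : List String) (b : Int) :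
    (L.map (fun s => (s, t))).foldl
      (fun best nt => if pvMatch nt.1 c then max best nt.2 else best) b
      = if L.any (fun s => pvMatch s c) then max b t else b := by
  induction L generalizing b with
  | nil => simp
  | cons s ss ih =>
    simp only [List.map_cons, List.foldl_cons, List.any_cons]
    by_cases h : pvMatch s c
    · simp only [h, Bool.true_or, if_true, ih]
      by_cases h2 : ss.any (fun s => pvMatch s c) <;> simp [h2]
    · simp [h, ih]

-- ===== VERDICT (by name: the statement is the Claim_ definition above) =====
theorem score_geography_spec : Claim_equal_score_geography := by
  intro country _
  unfold Spec_score_geography score_geography score_geography_alt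
  by_cases h0 : country = ""
  · simp [h0]
  · simp only [h0, if_false]
    set c := PySem.Str.strip (PySem.Str.lower country) with hc
    rw [pvTierTable, List.foldl_append, pvFold_const, pvFold_const, pvLoopP_eq, pvLoopM_eq]
    by_cases hp : pvPriority.any (fun s => pvMatch s c)
    · by_cases hm : pvModerate.any (fun s => pvMatch s c) <;> simp [hp, hm]
    · by_cases hm : pvModerate.any (fun s => pvMatch s c) <;> simp [hp, hm]
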